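-- pv_equiv track=rewrite | github.com/mlaurabs/PDP_instructions | Projeto/mutiple.py | getNameDateWell
-- ===== SOURCE A (Python) =====
-- def getNameDateWell(row): # retorna uma lista com o nome e a data de um poço - array
--     # - the well name must be enclosed in single or double quotes
--
--     aux = 0 # contador de aspas
--     aspas = ["'", '"']
--     name = ""
--     date = "" # formato a data?
--     dados = []
--
--     for i in range(len(row)):
--         if(row[i] in aspas):
--             if(aux != 2):
--                 aux +=1
--         elif(aux == 2):
--             if(ord(row[i]) >= 48 and ord(row[i]) <= 57): # verfica se é um número
--                 date += row[i]
--         else: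
--             if(aux == 1):
--                 name += row[i]
--
--     dados.append(name)
--     dados.append(date)
--     return dados
-- ===== SOURCE B (Python) =====
-- def getNameDateWell(row):
--     # locate delimiters first instead of running a quote counter
--     first = next((i for i, c in enumerate(row) if c in "'\""), None)
--     if first is None:
--         return ["", ""]
--     second = next((i for i in range(first + 1, len(row)) if row[i] in "'\""), None)
--     if second is None:
--         return [row[first + 1:], ""]
--     name = row[first + 1:second]
--     date = "".join(c for c in row[second + 1:] if "0" <= c <= "9")
--     return [name, date]
-- ===== Notes on version B (the rewrite author's own statement) =====
-- stated objective: simpler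
-- what changed: Replaces the single-pass quote-counting state machine with delimiter location: find the first and second quote indices, slice the name between them, and filter digits after the second.
import Mathlib
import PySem

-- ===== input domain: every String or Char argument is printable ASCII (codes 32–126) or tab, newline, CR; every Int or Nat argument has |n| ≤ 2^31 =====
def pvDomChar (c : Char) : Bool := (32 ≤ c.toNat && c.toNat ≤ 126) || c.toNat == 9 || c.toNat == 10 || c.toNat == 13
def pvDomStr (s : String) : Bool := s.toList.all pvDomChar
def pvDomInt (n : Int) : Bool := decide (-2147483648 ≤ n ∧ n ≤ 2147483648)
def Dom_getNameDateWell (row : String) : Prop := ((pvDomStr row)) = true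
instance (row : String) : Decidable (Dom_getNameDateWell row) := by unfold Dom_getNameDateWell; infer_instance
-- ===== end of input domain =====

-- ===== PORT A =====
-- B locates the quote delimiters first and slices/filters, instead of A's running quote counter; objective: simpler.
-- step of A's for-loop: state = (aux, name, date) as in the Python
def pvStepA (st : Int × List Char × List Char) (c : Char) : Int × List Char × List Char :=
  let (aux, name, date) := st
  if c = '\'' ∨ c = '"' then
    (if aux ≠ 2 then (aux + 1, name, date) else st)
  else if aux = 2 then
    (if 48 ≤ c.toNat ∧ c.toNat ≤ 57 then (aux, name, date ++ [c]) else st)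
  else
    (if aux = 1 then (aux, name ++ [c], date) else st)

def getNameDateWell (row : String) : List String :=
  let st := row.toList.foldl pvStepA (0, [], [])
  [String.ofList st.2.1, String.ofList st.2.2]

-- ===== PORT B =====
def pvIsQuote (c : Char) : Bool := c = '\'' || c = '"'

def getNameDateWell_alt (row : String) : List String :=
  let (_, rest) := row.toList.span (fun c => !pvIsQuote c)
  match rest with
  | [] => ["", ""]
  | _ :: after =>
    let (name, rest2) := after.span (fun c => !pvIsQuote c)
    match rest2 with
    | [] => [String.ofList name, ""]
    | _ :: tail => [String.ofList name, String.ofList (tail.filter (fun c => '0' ≤ c ∧ c ≤ '9'))]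

-- ===== PRECONDITION & SPEC =====
def Spec_getNameDateWell (row : String) (out : List String) : Prop := out = getNameDateWell_alt row
instance (row : String) (out : List String) : Decidable (Spec_getNameDateWell row out) := by unfold Spec_getNameDateWell; infer_instance

-- ===== CLAIM (what is proved, stated in full; the proofs are below) =====
def Claim_equal_getNameDateWell : Prop := ∀ (row : String), Dom_getNameDateWell row → Spec_getNameDateWell row (getNameDateWell row)

-- ===== LEMMAS AND PROOFS =====

theorem pvDigitIff (c : Char) : ('0' ≤ c ∧ c ≤ '9') ↔ (48 ≤ c.toNat ∧ c.toNat ≤ 57) := by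
  rw [Char.le_def, Char.le_def, UInt32.le_iff_toNat_le, UInt32.le_iff_toNat_le, Char.toNat]
  constructor <;> intro ⟨h1, h2⟩ <;> constructor <;> simpa using ‹_›

theorem pvPhase2 (s : List Char) (name date : List Char) :
    s.foldl pvStepA (2, name, date)
      = (2, name, date ++ s.filter (fun c => decide ('0' ≤ c ∧ c ≤ '9'))) := by
  induction s generalizing date with
  | nil => simp
  | cons c t ih =>
    simp only [List.foldl_cons, List.filter_cons]
    by_cases hq : c = '\'' ∨ c = '"'
    · have hd : ¬ ('0' ≤ c ∧ c ≤ '9') := by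
        rcases hq with h | h <;> subst h <;> decide
      simp [pvStepA, hq, ih, hd]
    · by_cases hd : 48 ≤ c.toNat ∧ c.toNat ≤ 57
      · simp [pvStepA, hq, ih, hd, (pvDigitIff c).mpr hd]
      · have hd' : ¬ ('0' ≤ c ∧ c ≤ '9') := fun h => hd ((pvDigitIff c).mp h)
        simp [pvStepA, hq, ih, hd, hd']

theorem pvPhase1 (s : List Char) (name date : List Char) :
    s.foldl pvStepA (1, name, date)
      = (match s.dropWhile (fun c => !pvIsQuote c) with
         | [] => (1, name ++ s.takeWhile (fun c => !pvIsQuote c), date)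
         | _ :: b => (2, name ++ s.takeWhile (fun c => !pvIsQuote c),
                       date ++ b.filter (fun c => decide ('0' ≤ c ∧ c ≤ '9')))) := by
  induction s generalizing name with
  | nil => simp
  | cons c t ih =>
    by_cases hq : c = '\'' ∨ c = '"'
    · have hq' : pvIsQuote c = true := by rcases hq with h | h <;> simp [pvIsQuote, h]
      simp [pvStepA, hq, hq', pvPhase2]
    · have hq' : pvIsQuote c = false := by
        simp only [pvIsQuote, Bool.or_eq_false_iff, decide_eq_false_iff_not]
        exact ⟨fun h => hq (Or.inl h), fun h => hq (Or.inr h)⟩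
      simp only [List.foldl_cons, List.dropWhile_cons, List.takeWhile_cons, hq',
        Bool.not_false, if_true]
      have hst : pvStepA (1, name, date) c = (1, name ++ [c], date) := by
        simp [pvStepA, hq]
      rw [hst, ih]
      cases t.dropWhile (fun c => !pvIsQuote c) <;> simp

theorem pvPhase0 (s : List Char) :
    s.foldl pvStepA (0, [], [])
      = (match s.dropWhile (fun c => !pvIsQuote c) with
         | [] => (0, [], [])
         | _ :: b =>
           match b.dropWhile (fun c => !pvIsQuote c) with
           | [] => (1, b.takeWhile (fun c => !pvIsQuote c), [])
           | _ :: b2 => (2, b.takeWhile (fun c => !pvIsQuote c),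
                          b2.filter (fun c => decide ('0' ≤ c ∧ c ≤ '9')))) := by
  induction s with
  | nil => simp
  | cons c t ih =>
    by_cases hq : c = '\'' ∨ c = '"'
    · have hq' : pvIsQuote c = true := by rcases hq with h | h <;> simp [pvIsQuote, h]
      simp only [List.foldl_cons, List.dropWhile_cons, hq', Bool.not_true,
        if_neg (by simp : ¬ (false = true))]
      have hst : pvStepA (0, [], []) c = (1, [], []) := by simp [pvStepA, hq]
      rw [hst, pvPhase1]
      cases t.dropWhile (fun c => !pvIsQuote c) <;> simp
    · have hq' : pvIsQuote c = false := by
        simp only [pvIsQuote, Bool.or_eq_false_iff, decide_eq_false_iff_not]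
        exact ⟨fun h => hq (Or.inl h), fun h => hq (Or.inr h)⟩
      have hst : pvStepA (0, [], []) c = (0, [], []) := by simp [pvStepA, hq]
      simp only [List.foldl_cons, List.dropWhile_cons, hq', Bool.not_false, if_true, hst, ih]

-- ===== VERDICT (by name: the statement is the Claim_ definition above) =====
theorem getNameDateWell_spec : Claim_equal_getNameDateWell := by
  intro row _
  unfold Spec_getNameDateWell getNameDateWell getNameDateWell_alt
  rw [pvPhase0]
  simp only [List.span_eq_takeWhile_dropWhile]
  cases h1 : row.toList.dropWhile (fun c => !pvIsQuote c) with
  | nil => simp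
  | cons q b =>
    cases h2 : b.dropWhile (fun c => !pvIsQuote c) with
    | nil => simp [h2]
    | cons q2 b2 => simp [h2]
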